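-- pv_equiv track=rewrite | github.com/medvedevgroup/minimizer-jaccard-estimator | winnowed_minimizers.py | winnowed_minimizers_circular
-- ===== SOURCE A (Python) =====
-- from collections import deque
--
-- def winnowed_minimizers_circular(perm,windowSize):
-- 	# note: we expect values in perm to be unique
-- 	# note: we treat perm as a circular sequence
--
-- 	history = deque()	# ordered oldest (front) to most recent (back)
-- 						# this will contain (value,position) pairs
--
-- 	minimizers = set()
-- 	for ix in range(len(perm)+windowSize-1):
-- 		windowIx = ix - (windowSize-1)
-- 		wrapround = (ix >= len(perm))
-- 		v = perm[ix] if (not wrapround) else perm[ix-len(perm)]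
--
-- 		# (at the back) remove anything worse than the current value
--
-- 		while (len(history) > 0) and (history[-1][0] > v):
-- 			history.pop()
--
-- 		# push the current value and its position to back of the queue
--
-- 		history.append((v,ix))
--
-- 		# (at the front) remove any minima that are no longer in the current
-- 		# window
--
-- 		while (len(history) > 0) and (history[0][1] < windowIx):
-- 			history.popleft()
--
-- 		# copy the minimizer from window, but only if we are seeing it for
-- 		# the first time
--
-- 		if (windowIx >= 0) and (len(history) > 0):
-- 			vHistory = history[0]
-- 			seenBefore = (vHistory in minimizers)
-- 			if (not seenBefore) and (vHistory[1] >= len(perm)):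
-- 				vHistory2 = (vHistory[0],vHistory[1]-len(perm))
-- 				if (vHistory2 in minimizers):
-- 					seenBefore = True
-- 			if (not seenBefore):
-- 				yield vHistory
-- 				minimizers.add(vHistory)
-- ===== SOURCE B (Python) =====
-- def winnowed_minimizers_circular(perm, windowSize):
-- 	# minimizer per window found by a direct scan of the window
-- 	n = len(perm)
-- 	minimizers = set()
-- 	for windowIx in range(n):
-- 		best = None
-- 		for j in range(windowIx, windowIx + windowSize):
-- 			v = perm[j] if j < n else perm[j - n]
-- 			if best is None or v < best[0]:
-- 				best = (v, j)
-- 		if best is None: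
-- 			continue
-- 		seenBefore = (best in minimizers)
-- 		if (not seenBefore) and best[1] >= n:
-- 			if (best[0], best[1] - n) in minimizers:
-- 				seenBefore = True
-- 		if not seenBefore:
-- 			yield best
-- 			minimizers.add(best)
-- ===== Notes on version B (the rewrite author's own statement) =====
-- stated objective: simpler
-- what changed: Replaces the monotonic deque maintained across a single extended pass with a direct per-window minimum scan (iterating windows 0..len(perm)-1 and scanning each window's positions for the smallest value and its extended position), feeding the same pair into the same dedup logic.
-- outside the precondition, e.g. on winnowed_minimizers_circular([1, 2], 4): A raises IndexError, B raises IndexError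
import Mathlib
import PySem

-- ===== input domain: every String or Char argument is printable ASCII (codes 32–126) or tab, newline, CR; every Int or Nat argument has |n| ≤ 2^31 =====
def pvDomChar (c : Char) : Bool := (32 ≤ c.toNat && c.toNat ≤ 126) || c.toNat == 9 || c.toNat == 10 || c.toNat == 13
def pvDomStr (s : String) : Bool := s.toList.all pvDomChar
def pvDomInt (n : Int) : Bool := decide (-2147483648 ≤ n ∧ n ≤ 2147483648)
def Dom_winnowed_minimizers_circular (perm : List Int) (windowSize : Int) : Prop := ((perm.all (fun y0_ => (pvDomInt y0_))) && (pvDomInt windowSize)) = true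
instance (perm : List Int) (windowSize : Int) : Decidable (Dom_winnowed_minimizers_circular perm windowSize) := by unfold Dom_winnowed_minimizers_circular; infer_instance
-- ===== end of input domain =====

-- B replaces A's monotonic deque over one extended pass by a direct minimum scan of each
-- window, keeping the identical dedup block: simpler, not faster (O(n·w) vs O(n)).

-- ===== PORT A =====
-- The deque is a list, front = head, back = end; the back-popping while loop is
-- dropWhile on the reversed list (exact: pops from the back while the last value > v),
-- the front-popping while loop is dropWhile (positions in the deque are increasing).
def winnowed_minimizers_circular (perm : List Int) (windowSize : Int) : List (Int × Int) :=
  (((PySem.List.pyRange 0 (PySem.List.len perm + windowSize - 1) 1).foldl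
    (fun st ix =>
      let history := st.1
      let minimizers := st.2.1
      let out := st.2.2
      let windowIx := ix - (windowSize - 1)
      let wrapround : Bool := decide (PySem.List.len perm ≤ ix)
      let v : Int := if wrapround then PySem.List.pyGetD perm (ix - PySem.List.len perm) 0
                     else PySem.List.pyGetD perm ix 0
      let history := (history.reverse.dropWhile (fun p => decide (v < p.1))).reverse
      let history := history ++ [(v, ix)]
      let history := history.dropWhile (fun p => decide (p.2 < windowIx))
      match history with
      | [] => (history, minimizers, out)
      | vHistory :: _ =>
        if 0 ≤ windowIx then
          let s1 := PySem.Set.contains minimizers vHistory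
          let seenBefore := if !s1 && decide (PySem.List.len perm ≤ vHistory.2) then
              PySem.Set.contains minimizers (vHistory.1, vHistory.2 - PySem.List.len perm)
            else s1
          if seenBefore then (history, minimizers, out)
          else (history, PySem.Set.add minimizers vHistory, out ++ [vHistory])
        else (history, minimizers, out))
    ([], (PySem.Set.empty, [])))).2.2

-- ===== PORT B =====
def winnowed_minimizers_circular_alt (perm : List Int) (windowSize : Int) : List (Int × Int) :=
  ((PySem.List.pyRange 0 (PySem.List.len perm) 1).foldl
    (fun st windowIx =>
      let minimizers := st.1
      let out := st.2
      let best : Option (Int × Int) :=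
        (PySem.List.pyRange windowIx (windowIx + windowSize) 1).foldl
          (fun best j =>
            let v : Int := if decide (j < PySem.List.len perm) then PySem.List.pyGetD perm j 0
                           else PySem.List.pyGetD perm (j - PySem.List.len perm) 0
            match best with
            | none => some (v, j)
            | some b => if v < b.1 then some (v, j) else best)
          none
      match best with
      | none => st
      | some b =>
        let s1 := PySem.Set.contains minimizers b
        let seenBefore := if !s1 && decide (PySem.List.len perm ≤ b.2) then
            PySem.Set.contains minimizers (b.1, b.2 - PySem.List.len perm)
          else s1
        if seenBefore then st
        else (PySem.Set.add minimizers b, out ++ [b]))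
    (PySem.Set.empty, [])).2

-- ===== PRECONDITION & SPEC =====
-- Pre_ excludes exactly the inputs where the Python raises IndexError: the wrapped read
-- perm[ix - len(perm)] goes out of range iff windowSize > len(perm) + 1.
def Pre_winnowed_minimizers_circular (perm : List Int) (windowSize : Int) : Prop :=
  windowSize ≤ (perm.length : Int) + 1
instance (perm : List Int) (windowSize : Int) : Decidable (Pre_winnowed_minimizers_circular perm windowSize) := by unfold Pre_winnowed_minimizers_circular; infer_instance

def pvWitness_winnowed_minimizers_circular : List Int × Int := ([3, 1, 2, 5, 4], 3)

def Spec_winnowed_minimizers_circular (perm : List Int) (windowSize : Int) (out : List (Int × Int)) : Prop := out = winnowed_minimizers_circular_alt perm windowSize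
instance (perm : List Int) (windowSize : Int) (out : List (Int × Int)) : Decidable (Spec_winnowed_minimizers_circular perm windowSize out) := by unfold Spec_winnowed_minimizers_circular; infer_instance

-- ===== CLAIM (what is proved, stated in full; the proofs are below) =====
def Claim_equal_winnowed_minimizers_circular : Prop := ∀ (perm : List Int) (windowSize : Int), Dom_winnowed_minimizers_circular perm windowSize → Pre_winnowed_minimizers_circular perm windowSize → Spec_winnowed_minimizers_circular perm windowSize (winnowed_minimizers_circular perm windowSize)

-- ===== LEMMAS AND PROOFS =====
def pvV (perm : List Int) (j : Nat) : Int :=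
  if j < perm.length then perm.getD j 0 else perm.getD (j - perm.length) 0

def pvSmins (perm : List Int) : List Nat → List Nat
  | [] => []
  | j :: l => if l.all (fun k => pvV perm j ≤ pvV perm k) then j :: pvSmins perm l else pvSmins perm l

def pvMsm (perm : List Int) (l : List Nat) : List (Int × Int) :=
  (pvSmins perm l).map (fun j => (pvV perm j, (j : Int)))

def pvStepA (perm : List Int) (windowSize : Int)
    (st : List (Int × Int) × (PySem.Set (Int × Int) × List (Int × Int))) (ix : Int) :
    List (Int × Int) × (PySem.Set (Int × Int) × List (Int × Int)) :=
      let history := st.1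
      let minimizers := st.2.1
      let out := st.2.2
      let windowIx := ix - (windowSize - 1)
      let wrapround : Bool := decide (PySem.List.len perm ≤ ix)
      let v : Int := if wrapround then PySem.List.pyGetD perm (ix - PySem.List.len perm) 0
                     else PySem.List.pyGetD perm ix 0
      let history := (history.reverse.dropWhile (fun p => decide (v < p.1))).reverse
      let history := history ++ [(v, ix)]
      let history := history.dropWhile (fun p => decide (p.2 < windowIx))
      match history with
      | [] => (history, minimizers, out)
      | vHistory :: _ =>
        if 0 ≤ windowIx then
          let s1 := PySem.Set.contains minimizers vHistory
          let seenBefore := if !s1 && decide (PySem.List.len perm ≤ vHistory.2) then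
              PySem.Set.contains minimizers (vHistory.1, vHistory.2 - PySem.List.len perm)
            else s1
          if seenBefore then (history, minimizers, out)
          else (history, PySem.Set.add minimizers vHistory, out ++ [vHistory])
        else (history, minimizers, out)

def pvStepB (perm : List Int) (windowSize : Int)
    (st : PySem.Set (Int × Int) × List (Int × Int)) (windowIx : Int) :
    PySem.Set (Int × Int) × List (Int × Int) :=
      let minimizers := st.1
      let out := st.2
      let best : Option (Int × Int) :=
        (PySem.List.pyRange windowIx (windowIx + windowSize) 1).foldl
          (fun best j =>
            let v : Int := if decide (j < PySem.List.len perm) then PySem.List.pyGetD perm j 0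
                           else PySem.List.pyGetD perm (j - PySem.List.len perm) 0
            match best with
            | none => some (v, j)
            | some b => if v < b.1 then some (v, j) else best)
          none
      match best with
      | none => st
      | some b =>
        let s1 := PySem.Set.contains minimizers b
        let seenBefore := if !s1 && decide (PySem.List.len perm ≤ b.2) then
            PySem.Set.contains minimizers (b.1, b.2 - PySem.List.len perm)
          else s1
        if seenBefore then st
        else (PySem.Set.add minimizers b, out ++ [b])

def pvSA (perm : List Int) (windowSize : Int) (m : Nat) :
    List (Int × Int) × (PySem.Set (Int × Int) × List (Int × Int)) :=
  (PySem.List.pyRange 0 (m : Int) 1).foldl (pvStepA perm windowSize) ([], (PySem.Set.empty, []))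

def pvSB (perm : List Int) (windowSize : Int) (t : Nat) :
    PySem.Set (Int × Int) × List (Int × Int) :=
  (PySem.List.pyRange 0 (t : Int) 1).foldl (pvStepB perm windowSize) (PySem.Set.empty, [])

def pvBstep (perm : List Int) (acc : Option (Int × Int)) (j : Nat) : Option (Int × Int) :=
  match acc with
  | none => some (pvV perm j, (j : Int))
  | some b => if pvV perm j < b.1 then some (pvV perm j, (j : Int)) else acc

-- ===== port ↔ fold bridges =====
lemma pvPortA_eq (perm : List Int) (w : Int) :
    winnowed_minimizers_circular perm w = (pvSA perm w (PySem.List.len perm + w - 1).toNat).2.2 := by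
  unfold winnowed_minimizers_circular pvSA
  rw [show PySem.List.pyRange 0 (PySem.List.len perm + w - 1) 1
        = PySem.List.pyRange 0 (((PySem.List.len perm + w - 1).toNat : Nat) : Int) 1 from by
    rw [PySem.List.pyRange_one, PySem.List.pyRange_one]; simp]
  rfl

lemma pvPortB_eq (perm : List Int) (w : Int) :
    winnowed_minimizers_circular_alt perm w = (pvSB perm w perm.length).2 := by
  unfold winnowed_minimizers_circular_alt pvSB
  rw [PySem.List.len_eq]
  rfl

-- ===== facts about pvSmins =====
lemma pvSmins_subset (perm : List Int) : ∀ l, ∀ j ∈ pvSmins perm l, j ∈ l := by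
  intro l
  induction l with
  | nil => simp [pvSmins]
  | cons i l ih =>
    intro j hj
    simp only [pvSmins] at hj
    split at hj
    · rcases List.mem_cons.mp hj with h | h
      · exact h ▸ List.mem_cons_self
      · exact List.mem_cons_of_mem _ (ih _ h)
    · exact List.mem_cons_of_mem _ (ih _ hj)

lemma pvSmins_ne_nil (perm : List Int) : ∀ l, l ≠ [] → pvSmins perm l ≠ [] := by
  intro l
  induction l with
  | nil => simp
  | cons i l ih =>
    intro _
    by_cases hl : l = []
    · subst hl; simp [pvSmins]
    · by_cases h : l.all (fun k => pvV perm i ≤ pvV perm k) <;>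
        simp [pvSmins, h, ih hl]

lemma pvDropWhile_append_singleton {α : Type} (q : α → Bool) (a : List α) (p : α)
    (hq : q p = false) : List.dropWhile q (a ++ [p]) = List.dropWhile q a ++ [p] := by
  rw [List.dropWhile_append]
  split
  · rename_i h
    rw [List.isEmpty_iff] at h
    rw [h]
    simp [List.dropWhile, hq]
  · rfl

lemma pvMsm_append_singleton (perm : List Int) : ∀ (l : List Nat) (j : Nat),
    pvMsm perm (l ++ [j]) =
      ((pvMsm perm l).reverse.dropWhile (fun p => decide (pvV perm j < p.1))).reverse
        ++ [(pvV perm j, (j : Int))] := by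
  intro l
  induction l with
  | nil => intro j; simp [pvMsm, pvSmins]
  | cons i l ih =>
    intro j
    have e1 := ih j
    simp only [pvMsm] at e1 ⊢
    rw [show (i :: l) ++ [j] = i :: (l ++ [j]) from rfl]
    by_cases hall : (l.all fun k => decide (pvV perm i ≤ pvV perm k)) = true
    · by_cases hij : pvV perm i ≤ pvV perm j
      · have hall2 : ((l ++ [j]).all fun k => decide (pvV perm i ≤ pvV perm k)) = true := by
          simp only [List.all_append, Bool.and_eq_true]
          exact ⟨hall, by simp [hij]⟩
        rw [pvSmins, if_pos hall2, pvSmins, if_pos hall]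
        rw [List.map_cons, List.map_cons, List.reverse_cons,
            pvDropWhile_append_singleton _ _ _ (by simp; omega)]
        rw [List.reverse_append, e1]
        simp
      · have hji : pvV perm j < pvV perm i := by omega
        have hall2 : ¬ ((l ++ [j]).all fun k => decide (pvV perm i ≤ pvV perm k)) = true := by
          simp only [List.all_append, Bool.and_eq_true]
          rintro ⟨-, hj2⟩
          simp at hj2
          omega
        have hLmem : ∀ x ∈ pvSmins perm l, pvV perm i ≤ pvV perm x := by
          intro x hx
          have := List.all_eq_true.mp hall x (pvSmins_subset perm l x hx)
          simpa using this
        have hdropAll : List.dropWhile (fun p => decide (pvV perm j < p.1))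
            ((pvSmins perm l).map (fun j => (pvV perm j, (j:Int)))).reverse = [] := by
          apply List.dropWhile_eq_nil_iff.mpr
          intro x hx
          simp only [List.mem_reverse, List.mem_map] at hx
          obtain ⟨k, hk, rfl⟩ := hx
          have := hLmem k hk
          simp
          omega
        rw [pvSmins, if_neg hall2, pvSmins, if_pos hall]
        rw [e1, hdropAll]
        have h2 : List.dropWhile (fun p => decide (pvV perm j < p.1))
            ((List.map (fun j => (pvV perm j, (j:Int))) (i :: pvSmins perm l)).reverse) = [] := by
          apply List.dropWhile_eq_nil_iff.mpr
          intro x hx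
          simp only [List.mem_reverse, List.mem_map] at hx
          obtain ⟨k, hk, rfl⟩ := hx
          rcases List.mem_cons.mp hk with rfl | hk'
          · exact decide_eq_true (by omega)
          · have := hLmem k hk'
            exact decide_eq_true (by omega)
        rw [h2]
    · have hall2 : ¬ ((l ++ [j]).all fun k => decide (pvV perm i ≤ pvV perm k)) = true := by
        simp only [List.all_append, Bool.and_eq_true]
        tauto
      rw [pvSmins, if_neg hall2, pvSmins, if_neg hall]
      exact e1

lemma pvSmins_append (perm : List Int) : ∀ a b, ∃ c, pvSmins perm (a ++ b) = c ++ pvSmins perm b ∧ ∀ x ∈ c, x ∈ a := by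
  intro a
  induction a with
  | nil => intro b; exact ⟨[], by simp⟩
  | cons i a ih =>
    intro b
    obtain ⟨c, hc, hmem⟩ := ih b
    by_cases h : (a ++ b).all (fun k => pvV perm i ≤ pvV perm k)
    · refine ⟨i :: c, by simp [pvSmins, h, hc], ?_⟩
      intro x hx
      rcases List.mem_cons.mp hx with h1 | h1
      · exact h1 ▸ List.mem_cons_self
      · exact List.mem_cons_of_mem _ (hmem x h1)
    · exact ⟨c, by simp [pvSmins, h, hc], fun x hx => List.mem_cons_of_mem _ (hmem x hx)⟩

lemma pvBfold_head (perm : List Int) : ∀ (l : List Nat) (i : Nat),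
    List.foldl (pvBstep perm) (some (pvV perm i, (i : Int))) l
      = ((pvSmins perm (i :: l)).head?).map (fun j => (pvV perm j, (j : Int))) := by
  intro l
  induction l with
  | nil => intro i; simp [pvSmins]
  | cons k l ih =>
    intro i
    rw [List.foldl_cons]
    by_cases hki : pvV perm k < pvV perm i
    · have hstep : pvBstep perm (some (pvV perm i, (i:Int))) k = some (pvV perm k, (k:Int)) := by
        simp [pvBstep, hki]
      rw [hstep, ih k]
      have : ¬ (k :: l).all (fun m => pvV perm i ≤ pvV perm m) := by
        simp; intro h; omega
      simp only [pvSmins]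
      simp [this]
    · have hstep : pvBstep perm (some (pvV perm i, (i:Int))) k = some (pvV perm i, (i:Int)) := by
        simp [pvBstep, hki]
      rw [hstep, ih i]
      by_cases hall : (k :: l).all (fun m => pvV perm i ≤ pvV perm m)
      · have hl : l.all (fun m => pvV perm i ≤ pvV perm m) := by
          simp only [List.all_cons, Bool.and_eq_true] at hall
          exact hall.2
        simp only [pvSmins, hall, hl, if_pos, List.head?_cons]
      · have hik : pvV perm i ≤ pvV perm k := by omega
        have hex : ¬ l.all (fun m => pvV perm i ≤ pvV perm m) := by
          simp only [List.all_cons, Bool.and_eq_true] at hall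
          intro h; exact hall ⟨by simpa using hik, h⟩
        obtain ⟨m, hm, hmlt⟩ : ∃ m ∈ l, pvV perm m < pvV perm i := by
          by_contra hcon
          push Not at hcon
          exact hex (List.all_eq_true.mpr (fun m hm => by simpa using (hcon m hm)))
        have hkl : ¬ l.all (fun x => pvV perm k ≤ pvV perm x) := by
          simp only [List.all_eq_true, not_forall]
          refine ⟨m, hm, by simp; omega⟩
        simp only [pvSmins]
        simp [hex, hkl]

-- ===== cast lemmas =====
lemma pvVA_cast (perm : List Int) (m : Nat) :
    (if decide (PySem.List.len perm ≤ (m : Int)) = true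
      then PySem.List.pyGetD perm ((m : Int) - PySem.List.len perm) 0
      else PySem.List.pyGetD perm (m : Int) 0) = pvV perm m := by
  simp only [PySem.List.len_eq]
  by_cases h : perm.length ≤ m
  · rw [if_pos (decide_eq_true (by exact_mod_cast h)),
        show ((m : Int) - (perm.length : Int)) = ((m - perm.length : Nat) : Int) from by omega,
        PySem.List.pyGetD_natCast]
    unfold pvV
    rw [if_neg (by omega)]
  · rw [if_neg (by simp; omega), PySem.List.pyGetD_natCast]
    unfold pvV
    rw [if_pos (by omega)]

lemma pvVB_cast (perm : List Int) (j : Nat) :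
    (if decide ((j : Int) < PySem.List.len perm) = true
      then PySem.List.pyGetD perm (j : Int) 0
      else PySem.List.pyGetD perm ((j : Int) - PySem.List.len perm) 0) = pvV perm j := by
  simp only [PySem.List.len_eq]
  by_cases h : j < perm.length
  · rw [if_pos (decide_eq_true (by exact_mod_cast h)), PySem.List.pyGetD_natCast]
    unfold pvV
    rw [if_pos h]
  · rw [if_neg (by simp; omega),
        show ((j : Int) - (perm.length : Int)) = ((j - perm.length : Nat) : Int) from by omega,
        PySem.List.pyGetD_natCast]
    unfold pvV
    rw [if_neg h]

lemma pvInner_cast (perm : List Int) : ∀ (k t : Nat) (acc : Option (Int × Int)),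
    (PySem.List.pyRange (t : Int) ((t : Int) + (k : Int)) 1).foldl
      (fun best j =>
        let v : Int := if decide (j < PySem.List.len perm) then PySem.List.pyGetD perm j 0
                       else PySem.List.pyGetD perm (j - PySem.List.len perm) 0
        match best with
        | none => some (v, j)
        | some b => if v < b.1 then some (v, j) else best)
      acc
    = (List.range' t k).foldl (pvBstep perm) acc := by
  intro k
  induction k with
  | zero =>
    intro t acc
    rw [show ((t : Int) + ((0:Nat) : Int)) = (t : Int) from by push_cast; ring]
    rw [PySem.List.pyRange_one_eq_nil le_rfl]
    rfl
  | succ k ih =>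
    intro t acc
    rw [PySem.List.pyRange_one_cons (by push_cast; omega), List.foldl_cons]
    simp only [pvVB_cast]
    rw [show ((t : Int) + 1) = (((t+1 : Nat)) : Int) from by push_cast; ring,
        show ((t : Int) + ((k+1 : Nat) : Int)) = (((t+1 : Nat) : Int) + (k : Int)) from by push_cast; ring]
    rw [ih (t+1)]
    rw [List.range'_succ]
    rfl

-- ===== fold-step unrollings =====
lemma pvSA_succ (perm : List Int) (w : Int) (m : Nat) :
    pvSA perm w (m+1) = pvStepA perm w (pvSA perm w m) (m : Int) := by
  unfold pvSA
  rw [show ((m+1 : Nat) : Int) = (m : Int) + 1 from by push_cast; ring]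
  rw [PySem.List.pyRange_one_succ_right (by positivity), List.foldl_append, List.foldl_cons, List.foldl_nil]

lemma pvSB_succ (perm : List Int) (w : Int) (t : Nat) :
    pvSB perm w (t+1) = pvStepB perm w (pvSB perm w t) (t : Int) := by
  unfold pvSB
  rw [show ((t+1 : Nat) : Int) = (t : Int) + 1 from by push_cast; ring]
  rw [PySem.List.pyRange_one_succ_right (by positivity), List.foldl_append, List.foldl_cons, List.foldl_nil]

-- ===== the deque window invariant: one step =====
lemma pvFront (perm : List Int) (w : Int) (hw : 1 ≤ w) (m : Nat) :
    List.dropWhile (fun p => decide (p.2 < (m : Int) - (w-1)))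
        (pvMsm perm (List.range' (m - w.toNat) (min m w.toNat + 1)))
      = pvMsm perm (List.range' ((m+1) - w.toNat) (min (m+1) w.toNat)) := by
  have hcast : ((w.toNat : Int)) = w := Int.toNat_of_nonneg (by omega)
  set wn := w.toNat with hwn
  have hw1 : 1 ≤ wn := by omega
  set lo := m - wn with hlo
  set lo' := (m+1) - wn with hlo'
  set c' := min (m+1) wn with hc'
  have hsplit : List.range' lo (min m wn + 1) = List.range' lo (lo' - lo) ++ List.range' lo' c' := by
    have h1 : lo + 1 * (lo' - lo) = lo' := by omega
    rw [show min m wn + 1 = (lo' - lo) + c' from by omega, ← List.range'_append, h1]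
  rw [hsplit]
  obtain ⟨cs, hcs, hcsmem⟩ := pvSmins_append perm (List.range' lo (lo' - lo)) (List.range' lo' c')
  unfold pvMsm
  rw [hcs, List.map_append, List.dropWhile_append]
  have hnil : List.dropWhile (fun p => decide (p.2 < (m : Int) - (w-1)))
      (cs.map (fun j => (pvV perm j, (j : Int)))) = [] := by
    apply List.dropWhile_eq_nil_iff.mpr
    intro x hx
    simp only [List.mem_map] at hx
    obtain ⟨k, hk, rfl⟩ := hx
    have := hcsmem k hk
    have hkmem := List.mem_range'_1.mp this
    exact decide_eq_true (by omega)
  rw [hnil]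
  simp only [List.isEmpty_nil, if_pos]
  cases hsm : pvSmins perm (List.range' lo' c') with
  | nil =>
    simp
  | cons j0 rest =>
    have hj0 : j0 ∈ List.range' lo' c' :=
      pvSmins_subset perm _ j0 (by rw [hsm]; exact List.mem_cons_self)
    have hj0mem := List.mem_range'_1.mp hj0
    rw [List.map_cons, List.dropWhile_cons_of_neg (by simp only [decide_eq_true_eq]; omega)]

lemma pvStepA_main (perm : List Int) (w : Int) (hw : 1 ≤ w) (m : Nat)
    (p : PySem.Set (Int × Int) × List (Int × Int)) :
    pvStepA perm w (pvMsm perm (List.range' (m - w.toNat) (min m w.toNat)), p) (m : Int)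
    = (pvMsm perm (List.range' ((m+1) - w.toNat) (min (m+1) w.toNat)),
       if w.toNat - 1 ≤ m then pvStepB perm w p ((m - (w.toNat - 1) : Nat) : Int) else p) := by
  have hcast : ((w.toNat : Int)) = w := Int.toNat_of_nonneg (by omega)
  set wn := w.toNat with hwn
  have hw1 : 1 ≤ wn := by omega
  simp only [pvStepA]
  rw [pvVA_cast]
  rw [← pvMsm_append_singleton]
  rw [show List.range' (m - wn) (min m wn) ++ [m] = List.range' (m - wn) (min m wn + 1) from by
        rw [List.range'_concat, show (m - wn) + 1 * (min m wn) = m from by omega]]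
  rw [pvFront perm w hw m]
  have hne : List.range' ((m+1) - wn) (min (m+1) wn) ≠ [] := by
    intro h
    have := congrArg List.length h
    simp [List.length_range'] at this
    omega
  cases hsm : pvSmins perm (List.range' ((m+1) - wn) (min (m+1) wn)) with
  | nil => exact absurd hsm (pvSmins_ne_nil perm _ hne)
  | cons j0 rest =>
    rw [show pvMsm perm (List.range' ((m+1) - wn) (min (m+1) wn))
          = (pvV perm j0, (j0 : Int)) :: rest.map (fun j => (pvV perm j, (j : Int))) from by
        unfold pvMsm; rw [hsm]; rfl]
    by_cases hyield : wn - 1 ≤ m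
    · simp only []
      rw [if_pos (show (0:Int) ≤ (m : Int) - (w-1) from by omega), if_pos hyield]
      simp only [pvStepB]
      rw [← hcast]
      rw [pvInner_cast perm wn (m - (wn-1)) none]
      rw [show List.range' (m - (wn-1)) wn = List.range' ((m+1) - wn) (min (m+1) wn) from by
            congr 1 <;> omega]
      rw [show List.range' ((m+1) - wn) (min (m+1) wn)
            = ((m+1) - wn) :: List.range' ((m+1) - wn + 1) (min (m+1) wn - 1) from by
          conv_lhs => rw [show min (m+1) wn = (min (m+1) wn - 1) + 1 from by omega, List.range'_succ]]
      rw [List.foldl_cons]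
      rw [show pvBstep perm none (((m+1) - wn)) = some (pvV perm ((m+1) - wn), (((m+1) - wn : Nat) : Int)) from rfl]
      rw [pvBfold_head]
      rw [show ((m+1) - wn) :: List.range' ((m+1) - wn + 1) (min (m+1) wn - 1)
            = List.range' ((m+1) - wn) (min (m+1) wn) from by
          conv_rhs => rw [show min (m+1) wn = (min (m+1) wn - 1) + 1 from by omega, List.range'_succ]]
      rw [hsm]
      simp only [List.head?_cons, Option.map_some]
      split <;> split <;> rfl
    · simp only []
      rw [if_neg (show ¬ (0:Int) ≤ (m : Int) - (w-1) from by omega), if_neg hyield]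

lemma pvInv (perm : List Int) (w : Int) (hw : 1 ≤ w) : ∀ m : Nat,
    pvSA perm w m = (pvMsm perm (List.range' (m - w.toNat) (min m w.toNat)),
                     pvSB perm w (m - (w.toNat - 1))) := by
  intro m
  induction m with
  | zero =>
    unfold pvSA pvSB
    simp only [Nat.cast_zero, Nat.zero_sub, Nat.zero_min]
    rw [PySem.List.pyRange_one_eq_nil le_rfl]
    rfl
  | succ m ih =>
    rw [pvSA_succ, ih, pvStepA_main perm w hw m]
    by_cases h : w.toNat - 1 ≤ m
    · rw [if_pos h, show (m+1) - (w.toNat-1) = (m - (w.toNat-1)) + 1 from by omega, pvSB_succ]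
    · rw [if_neg h, show (m+1) - (w.toNat-1) = m - (w.toNat-1) from by omega]

lemma pvA_nil (perm : List Int) (w : Int) (hw : w ≤ 0) : ∀ m : Nat,
    pvSA perm w m = ([], (PySem.Set.empty, [])) := by
  intro m
  induction m with
  | zero =>
    unfold pvSA
    simp only [Nat.cast_zero]
    rw [PySem.List.pyRange_one_eq_nil le_rfl]
    rfl
  | succ m ih =>
    rw [pvSA_succ, ih]
    simp only [pvStepA]
    rw [List.reverse_nil, List.dropWhile_nil, List.reverse_nil, List.nil_append]
    rw [List.dropWhile_cons, if_pos (decide_eq_true (by omega)), List.dropWhile_nil]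

lemma pvB_nil (perm : List Int) (w : Int) (hw : w ≤ 0) : ∀ t : Nat,
    pvSB perm w t = (PySem.Set.empty, []) := by
  intro t
  induction t with
  | zero =>
    unfold pvSB
    simp only [Nat.cast_zero]
    rw [PySem.List.pyRange_one_eq_nil le_rfl]
    rfl
  | succ t ih =>
    rw [pvSB_succ, ih]
    simp only [pvStepB]
    rw [PySem.List.pyRange_one_eq_nil (by omega)]
    rfl

-- ===== VERDICT (by name: the statement is the Claim_ definition above) =====
theorem winnowed_minimizers_circular_spec : Claim_equal_winnowed_minimizers_circular := by
  intro perm w _hdom _hpre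
  unfold Spec_winnowed_minimizers_circular
  rw [pvPortA_eq, pvPortB_eq]
  by_cases hw : 1 ≤ w
  · rw [pvInv perm w hw]
    rw [show (PySem.List.len perm + w - 1).toNat - (w.toNat - 1) = perm.length from by
      simp only [PySem.List.len_eq]; omega]
  · rw [pvA_nil perm w (by omega), pvB_nil perm w (by omega)]
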